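-- pv_equiv track=rewrite | github.com/songyw0517/programmers_algorithm | 2018 KAKAO BLIND RECRUITMENT/[1차]비밀지도.py | solution
-- ===== SOURCE A (Python) =====
-- def expressMap(n, num):
--     Map = list(bin(num))
--     Map = Map[2:]
--     while len(Map)<n:
--         Map.insert(0, 0)
--     return Map
--
-- def solution(n, arr1, arr2):
--     answer = []
--     Map1 = []
--     Map2 = []
--     for i in arr1:
--         Map1.append(expressMap(n, i))
--     for i in arr2:
--         Map2.append(expressMap(n, i))
--
--     for i in range(n):
--         temp = ""
--         for j in range(n):
--             if int(Map1[i][j]) or int(Map2[i][j]):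
--                 temp += "#"
--             else:
--                 temp += " "
--         answer.append(temp)
--     return answer
-- ===== SOURCE B (Python) =====
-- def solution(n, arr1, arr2):
--     table = str.maketrans("10", "# ")
--     return [bin(arr1[i] | arr2[i])[2:].zfill(n).translate(table) for i in range(n)]
-- ===== Notes on version B (the rewrite author's own statement) =====
-- stated objective: faster
-- what changed: B ORs the two row integers with a single integer bitwise | and formats the result once via bin()[2:].zfill(n).translate in one comprehension, instead of A's building two full grids of per-number digit lists (each built by repeated O(len) list.insert(0,...) front-insertions) and then comparing digits with int() in a nested n-by-n loop; this removes the quadratic front-insertion padding and per-char int() parsing.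
-- outside the precondition, e.g. on solution(1, [2], [0]): A returns ['#'], B returns ['# ']; on solution(1, [1], [2]): A returns ['#'], B returns ['##']; on solution(1, [1], [-1]): A returns ['#'], B returns ['b#']
import Mathlib
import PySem

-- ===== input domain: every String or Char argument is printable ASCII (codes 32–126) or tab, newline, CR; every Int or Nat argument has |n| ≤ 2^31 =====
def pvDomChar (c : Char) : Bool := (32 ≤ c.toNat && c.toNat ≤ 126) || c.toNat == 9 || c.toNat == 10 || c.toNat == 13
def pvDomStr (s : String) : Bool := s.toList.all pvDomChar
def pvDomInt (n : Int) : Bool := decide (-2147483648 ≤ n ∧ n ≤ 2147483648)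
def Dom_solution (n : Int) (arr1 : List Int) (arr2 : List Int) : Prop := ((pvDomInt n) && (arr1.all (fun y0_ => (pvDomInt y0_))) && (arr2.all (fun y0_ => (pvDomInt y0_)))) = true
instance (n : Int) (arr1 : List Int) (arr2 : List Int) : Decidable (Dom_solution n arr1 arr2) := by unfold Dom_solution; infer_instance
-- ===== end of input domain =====

-- B ORs the two row integers with one integer `|` and formats once with bin/zfill/translate,
-- instead of A's two precomputed digit grids and nested per-digit int() comparison (objective: idiomatic).

-- ===== PORT A =====

-- the digit loop of bin(): repeated halving, most significant digit first ([] for 0);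
-- structural on a fuel counter, and fuel = the number itself always suffices (m/2 < m)
def pvNatBinA : Nat → Nat → List Char
  | 0, _ => []
  | fuel + 1, m => if m = 0 then [] else pvNatBinA fuel (m / 2) ++ [if m % 2 = 1 then '1' else '0']

-- list(bin(num))
def pvBinList (num : Int) : List Char :=
  if num < 0 then '-' :: '0' :: 'b' :: pvNatBinA (-num).toNat (-num).toNat
  else if num = 0 then ['0', 'b', '0']
  else '0' :: 'b' :: pvNatBinA num.toNat num.toNat

-- the while-loop 'while len(Map)<n: Map.insert(0, 0)': it runs exactly (n - len(Map)).toNat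
-- times, each time consing at the front; Python inserts the int 0, which behaves under the
-- later int(...) exactly like the char '0', so the port inserts '0'
def pvPadA : Nat → List Char → List Char
  | 0, Map => Map
  | k + 1, Map => pvPadA k ('0' :: Map)

def pvPad (n : Int) (Map : List Char) : List Char := pvPadA (n - Map.length).toNat Map

def expressMap (n : Int) (num : Int) : List Char :=
  pvPad n ((pvBinList num).drop 2)   -- Map[2:] with a nonnegative literal start = drop 2

-- int(entry): entries are '0'/'1' (or the inserted int 0, represented '0'); on a 'b' from a
-- negative num Python raises ValueError (outside Pre_), the port returns 0 there
def pvEntryInt (c : Char) : Int := if c = '1' then 1 else 0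

def solution (n : Int) (arr1 : List Int) (arr2 : List Int) : List String :=
  let Map1 := arr1.foldl (fun acc i => acc ++ [expressMap n i]) []
  let Map2 := arr2.foldl (fun acc i => acc ++ [expressMap n i]) []
  (PySem.List.pyRange 0 n 1).foldl (fun answer i =>
    answer ++ [(PySem.List.pyRange 0 n 1).foldl (fun temp j =>
      -- Map1[i][j]: in range under Pre_; out of range Python raises IndexError (outside Pre_)
      if pvEntryInt (PySem.List.pyGetD (PySem.List.pyGetD Map1 i []) j '0') ≠ 0 ∨
         pvEntryInt (PySem.List.pyGetD (PySem.List.pyGetD Map2 i []) j '0') ≠ 0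
      then temp ++ "#" else temp ++ " ") ""]) []

-- ===== PORT B =====

-- the digit loop of bin(): fuel-counted halving, most significant digit first ([] for 0)
def pvNatBinB : Nat → Nat → List Char
  | 0, _ => []
  | fuel + 1, m => if m = 0 then [] else pvNatBinB fuel (m / 2) ++ [if m % 2 = 1 then '1' else '0']

-- bin(m)[2:]
def pvBinBody (m : Int) : List Char :=
  if m < 0 then 'b' :: pvNatBinB (-m).toNat (-m).toNat
  else if m = 0 then ['0'] else pvNatBinB m.toNat m.toNat

-- str.zfill(n): left-pad with '0' (the sign branch of zfill is unreachable: the string never starts with +/-)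
def pvZfill (n : Int) (s : List Char) : List Char :=
  List.replicate (n.toNat - s.length) '0' ++ s

-- .translate(str.maketrans("10", "# "))
def pvGlyph (c : Char) : Char := if c = '1' then '#' else if c = '0' then ' ' else c

def solution_alt (n : Int) (arr1 : List Int) (arr2 : List Int) : List String :=
  (PySem.List.pyRange 0 n 1).map (fun i =>
    -- arr1[i] / arr2[i]: in range under Pre_; out of range Python raises IndexError (outside Pre_)
    String.ofList ((pvZfill n (pvBinBody
      (Int.lor (PySem.List.pyGetD arr1 i 0) (PySem.List.pyGetD arr2 i 0)))).map pvGlyph))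

-- ===== PRECONDITION & SPEC =====
-- Pre_ restricts to the problem's natural domain: the first n rows exist in both arrays and
-- every entry used lies in [0, 2^n), the stated contract of the secret-map task. Excluded
-- inputs on which A still returns: an entry ≥ 2^n — there no n-wide map is specified and
-- A's first-n-characters truncation of the over-long digit list and B's full-width rendering
-- are equally arbitrary values of an unspecified corner; also the rare negative entry whose
-- 'b' digit is masked by the short-circuit `or` (on most negative entries A raises
-- ValueError, and on missing rows IndexError).
def Pre_solution (n : Int) (arr1 : List Int) (arr2 : List Int) : Prop :=
  n ≤ arr1.length ∧ n ≤ arr2.length ∧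
  ∀ x ∈ arr1.take n.toNat ++ arr2.take n.toNat, 0 ≤ x ∧ x < 2 ^ n.toNat

instance (n : Int) (arr1 : List Int) (arr2 : List Int) : Decidable (Pre_solution n arr1 arr2) := by
  unfold Pre_solution; infer_instance

def pvWitness_solution : Int × List Int × List Int := (2, [1, 2, 5], [2, 3])

def Spec_solution (n : Int) (arr1 : List Int) (arr2 : List Int) (out : List String) : Prop := out = solution_alt n arr1 arr2
instance (n : Int) (arr1 : List Int) (arr2 : List Int) (out : List String) : Decidable (Spec_solution n arr1 arr2 out) := by unfold Spec_solution; infer_instance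

-- ===== CLAIM =====
def Claim_equal_solution : Prop := ∀ (n : Int) (arr1 : List Int) (arr2 : List Int), Dom_solution n arr1 arr2 → Pre_solution n arr1 arr2 → Spec_solution n arr1 arr2 (solution n arr1 arr2)

-- ===== LEMMAS AND PROOFS =====

-- reference description: the width-w binary rendering of m, most significant bit first
def pvBitChar (m w : Nat) : Char := if m.testBit w then '1' else '0'
def pvRef (w m : Nat) : List Char := (List.range w).map (fun j => pvBitChar m (w - 1 - j))

theorem pvRef_succ (w m : Nat) : pvRef (w + 1) m = pvBitChar m w :: pvRef w m := by
  simp only [pvRef, List.range_succ_eq_map, List.map_cons, List.map_map, Function.comp_def]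
  have h0 : w + 1 - 1 - 0 = w := by omega
  have h1 : ∀ j : Nat, w + 1 - 1 - (j + 1) = w - 1 - j := by omega
  simp only [h0, h1, Nat.succ_eq_add_one]

theorem pvRef_div (w m : Nat) : pvRef (w + 1) m = pvRef w (m / 2) ++ [pvBitChar m 0] := by
  simp only [pvRef, List.range_succ, List.map_append, List.map_cons, List.map_nil]
  congr 1
  · apply List.map_congr_left
    intro j hj
    rw [List.mem_range] at hj
    have h : w - j = (w - 1 - j) + 1 := by omega
    simp [pvBitChar, Nat.testBit_div_two, h]
  · have : w + 1 - 1 - w = 0 := by omega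
    rw [this]

theorem natBinA_eq : ∀ (fuel m : Nat), pvNatBinA fuel m = pvNatBinB fuel m := by
  intro fuel
  induction fuel with
  | zero => intro m; rfl
  | succ f ih => intro m; rw [pvNatBinA, pvNatBinB, ih]

theorem natBinB_zero (fuel : Nat) : pvNatBinB fuel 0 = [] := by
  cases fuel <;> simp [pvNatBinB]

theorem natBinB_ref : ∀ (fuel m : Nat), m ≤ fuel →
    pvNatBinB fuel m = pvRef (pvNatBinB fuel m).length m := by
  intro fuel
  induction fuel with
  | zero => intro m hm; interval_cases m; simp [pvNatBinB, pvRef]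
  | succ f ih =>
    intro m hm
    by_cases h0 : m = 0
    · subst h0; simp [pvNatBinB, pvRef]
    · have ihm := ih (m / 2) (by omega)
      have hd : (if m % 2 = 1 then '1' else '0') = pvBitChar m 0 := by
        simp [pvBitChar, Nat.testBit_zero]
      conv_lhs => rw [pvNatBinB]
      simp only [h0, if_false, hd]
      rw [ihm, ← pvRef_div]
      congr 1
      conv_rhs => rw [pvNatBinB]
      simp [h0]

theorem natBinB_len_le : ∀ (w m fuel : Nat), m ≤ fuel → m < 2 ^ w →
    (pvNatBinB fuel m).length ≤ w := by
  intro w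
  induction w with
  | zero => intro m fuel hf hm; interval_cases m; simp [natBinB_zero]
  | succ w ih =>
    intro m fuel hf hm
    by_cases h0 : m = 0
    · subst h0; simp [natBinB_zero]
    · obtain ⟨f, rfl⟩ : ∃ f, fuel = f + 1 := ⟨fuel - 1, by omega⟩
      rw [pvNatBinB]; simp only [h0, if_false]
      have h2 : m / 2 < 2 ^ w := by rw [pow_succ] at hm; omega
      have := ih (m / 2) f (by omega) h2
      simp; omega

theorem natBinB_lt : ∀ (fuel m : Nat), m ≤ fuel → m < 2 ^ (pvNatBinB fuel m).length := by
  intro fuel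
  induction fuel with
  | zero => intro m hm; interval_cases m; simp [natBinB_zero]
  | succ f ih =>
    intro m hm
    by_cases h0 : m = 0
    · subst h0; simp [natBinB_zero]
    · rw [pvNatBinB]; simp only [h0, if_false]
      have := ih (m / 2) (by omega)
      simp only [List.length_append, List.length_cons, List.length_nil, Nat.zero_add, pow_succ]
      omega

theorem pad_ref (k : Nat) : ∀ (L m : Nat), m < 2 ^ L →
    List.replicate k '0' ++ pvRef L m = pvRef (L + k) m := by
  induction k with
  | zero => intro L m _; simp
  | succ k ih =>
    intro L m hm
    have hLk : L + (k + 1) = (L + k) + 1 := by omega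
    rw [hLk, pvRef_succ]
    have hbit : m.testBit (L + k) = false :=
      Nat.testBit_lt_two_pow (lt_of_lt_of_le hm (Nat.pow_le_pow_right (by omega) (by omega)))
    rw [← ih L m hm]
    simp [pvBitChar, hbit, List.replicate_succ]

-- the digit body of bin(m) for m ≥ 0 is pvRef of its own length, and bounded by 2^length
theorem binBody_ref (m : Int) (hm : 0 ≤ m) :
    pvBinBody m = pvRef (pvBinBody m).length m.toNat ∧ m.toNat < 2 ^ (pvBinBody m).length := by
  rw [pvBinBody]
  split
  · omega
  · split
    · subst_vars
      refine ⟨?_, by simp⟩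
      simp [pvRef, pvBitChar]
    · exact ⟨natBinB_ref m.toNat m.toNat le_rfl, natBinB_lt m.toNat m.toNat le_rfl⟩

theorem toNat_lt_pow (a : Int) (w : Nat) (ha : 0 ≤ a) (h : a < 2 ^ w) : a.toNat < 2 ^ w := by
  rw [← Int.toNat_of_nonneg ha] at h
  exact_mod_cast h

theorem binBody_len_le (m : Int) (w : Nat) (hw : 0 < w) (hm : 0 ≤ m) (hb : m.toNat < 2 ^ w) :
    (pvBinBody m).length ≤ w := by
  have := natBinB_len_le w m.toNat m.toNat le_rfl hb
  rw [pvBinBody]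
  split
  · omega
  · split
    · simpa using hw
    · simpa using this

theorem pvPadA_eq : ∀ (k : Nat) (Map : List Char),
    pvPadA k Map = List.replicate k '0' ++ Map := by
  intro k
  induction k with
  | zero => intro Map; rfl
  | succ k ih =>
    intro Map
    rw [pvPadA, ih]
    simp [List.replicate_succ', List.append_assoc]

theorem pvPad_eq (n : Int) (Map : List Char) :
    pvPad n Map = List.replicate (n.toNat - Map.length) '0' ++ Map := by
  rw [pvPad, pvPadA_eq]
  congr 2
  omega

-- zero-padding any bin body to width w gives the width-w rendering
theorem zfill_body_ref (m : Int) (w : Nat) (hw : 0 < w) (hm : 0 ≤ m) (hb : m.toNat < 2 ^ w) :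
    List.replicate (w - (pvBinBody m).length) '0' ++ pvBinBody m = pvRef w m.toNat := by
  obtain ⟨h1, h2⟩ := binBody_ref m hm
  have hlen := binBody_len_le m w hw hm hb
  calc List.replicate (w - (pvBinBody m).length) '0' ++ pvBinBody m
      = List.replicate (w - (pvBinBody m).length) '0' ++ pvRef (pvBinBody m).length m.toNat := by
        rw [← h1]
    _ = pvRef ((pvBinBody m).length + (w - (pvBinBody m).length)) m.toNat := pad_ref _ _ _ h2
    _ = pvRef w m.toNat := by congr 1; omega

-- A's expressMap produces exactly the width-n rendering on in-contract entries
theorem expressMap_ref (n a : Int) (hn : 0 < n) (ha : 0 ≤ a) (hb : a < 2 ^ n.toNat) :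
    expressMap n a = pvRef n.toNat a.toNat := by
  have hbody : (pvBinList a).drop 2 = pvBinBody a := by
    rw [pvBinList, pvBinBody]
    split
    · omega
    · split
      · simp
      · simp [natBinA_eq]
  rw [expressMap, hbody, pvPad_eq]
  exact zfill_body_ref a n.toNat (by omega) ha (toNat_lt_pow a n.toNat ha hb)

-- B's zfilled body is the same width-n rendering
theorem zfill_ref (n m : Int) (hn : 0 < n) (hm : 0 ≤ m) (hb : m.toNat < 2 ^ n.toNat) :
    pvZfill n (pvBinBody m) = pvRef n.toNat m.toNat := by
  rw [pvZfill]
  exact zfill_body_ref m n.toNat (by omega) hm hb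

theorem int_lor_toNat (a b : Int) (ha : 0 ≤ a) (hb : 0 ≤ b) :
    Int.lor a b = ((a.toNat ||| b.toNat : Nat) : Int) := by
  obtain ⟨m, rfl⟩ := Int.eq_ofNat_of_zero_le ha
  obtain ⟨k, rfl⟩ := Int.eq_ofNat_of_zero_le hb
  rfl

theorem lor_lt_pow (m k w : Nat) (hm : m < 2 ^ w) (hk : k < 2 ^ w) : m ||| k < 2 ^ w :=
  Nat.bitwise_lt_two_pow hm hk

-- a string-building fold is a map
theorem fold_str {α : Type} (l : List α) (g : α → Char) (s : String) :
    l.foldl (fun s x => s ++ String.ofList [g x]) s = s ++ String.ofList (l.map g) := by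
  induction l generalizing s with
  | nil =>
    apply String.toList_inj.mp
    simp
  | cons x xs ih =>
    simp only [List.foldl_cons, List.map_cons, ih]
    apply String.toList_inj.mp
    simp

-- the inner loop of A over two width-n renderings equals B's glyph string of the lor
theorem row_eq (n : Int) (m1 m2 : Nat) :
    (PySem.List.pyRange 0 n 1).foldl (fun temp j =>
      if pvEntryInt (PySem.List.pyGetD (pvRef n.toNat m1) j '0') ≠ 0 ∨
         pvEntryInt (PySem.List.pyGetD (pvRef n.toNat m2) j '0') ≠ 0
      then temp ++ "#" else temp ++ " ") ""
    = String.ofList ((pvRef n.toNat (m1 ||| m2)).map pvGlyph) := by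
  have hfun : (fun (temp : String) (j : Int) =>
      if pvEntryInt (PySem.List.pyGetD (pvRef n.toNat m1) j '0') ≠ 0 ∨
         pvEntryInt (PySem.List.pyGetD (pvRef n.toNat m2) j '0') ≠ 0
      then temp ++ "#" else temp ++ " ")
      = (fun (temp : String) (j : Int) => temp ++ String.ofList
        [if pvEntryInt (PySem.List.pyGetD (pvRef n.toNat m1) j '0') ≠ 0 ∨
            pvEntryInt (PySem.List.pyGetD (pvRef n.toNat m2) j '0') ≠ 0
         then '#' else ' ']) := by
    funext temp j
    split <;> rfl
  rw [hfun, fold_str]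
  apply String.toList_inj.mp
  simp only [String.toList_append, String.toList_ofList]
  have hempty : ("" : String).toList = [] := rfl
  rw [hempty, List.nil_append]
  rw [PySem.List.pyRange_one]
  simp only [Int.sub_zero, List.map_map, Function.comp_def]
  conv_rhs => rw [pvRef]
  rw [List.map_map]
  apply List.map_congr_left
  intro j hj
  rw [List.mem_range] at hj
  have hget : ∀ m : Nat, PySem.List.pyGetD (pvRef n.toNat m) ((0 : Int) + (j : Int)) '0'
      = pvBitChar m (n.toNat - 1 - j) := by
    intro m
    rw [Int.zero_add, PySem.List.pyGetD_natCast]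
    rw [pvRef, List.getD_eq_getElem?_getD]
    simp [hj]
  simp only [hget, Function.comp_def]
  simp only [pvBitChar, pvEntryInt, pvGlyph, Nat.testBit_lor]
  by_cases h1 : m1.testBit (n.toNat - 1 - j) <;>
    by_cases h2 : m2.testBit (n.toNat - 1 - j) <;>
    simp [h1, h2]

theorem map_foldl_append {α β : Type} (l : List α) (f : α → β) :
    l.foldl (fun acc x => acc ++ [f x]) [] = l.map f := by
  simpa using PySem.List.foldl_append_singleton_eq_map (l := l) (f := f) (acc := [])

-- ===== VERDICT =====
theorem solution_spec : Claim_equal_solution := by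
  intro n arr1 arr2 _ hpre
  obtain ⟨hl1, hl2, hent⟩ := hpre
  show solution n arr1 arr2 = solution_alt n arr1 arr2
  rw [solution, solution_alt]
  simp only [map_foldl_append]
  apply List.map_congr_left
  intro i hi
  rw [PySem.List.mem_pyRange_one] at hi
  obtain ⟨hi0, hin⟩ := hi
  have hn0 : 0 < n := lt_of_le_of_lt hi0 hin
  have hiw : i.toNat < n.toNat := by omega
  have hi1 : i.toNat < arr1.length := by omega
  have hi2 : i.toNat < arr2.length := by omega
  have hmem1 : arr1[i.toNat] ∈ arr1.take n.toNat ++ arr2.take n.toNat := by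
    apply List.mem_append_left
    have h : (arr1.take n.toNat)[i.toNat]'(by simp; omega) = arr1[i.toNat] := List.getElem_take
    exact h ▸ List.getElem_mem _
  have hmem2 : arr2[i.toNat] ∈ arr1.take n.toNat ++ arr2.take n.toNat := by
    apply List.mem_append_right
    have h : (arr2.take n.toNat)[i.toNat]'(by simp; omega) = arr2[i.toNat] := List.getElem_take
    exact h ▸ List.getElem_mem _
  obtain ⟨ha1, ha2⟩ := hent _ hmem1
  obtain ⟨hb1, hb2⟩ := hent _ hmem2
  have hrow : ∀ (arr : List Int) (h : i.toNat < arr.length),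
      PySem.List.pyGetD (arr.map (expressMap n)) i []
        = expressMap n (arr[i.toNat]'h) := by
    intro arr h
    rw [PySem.List.pyGetD_eq_getElem (arr.map (expressMap n)) [] hi0
      (by simp only [List.length_map]; omega)]
    simp
  have hget : ∀ (arr : List Int) (h : i.toNat < arr.length),
      PySem.List.pyGetD arr i 0 = arr[i.toNat]'h := by
    intro arr h
    rw [PySem.List.pyGetD_eq_getElem arr 0 hi0 (by omega)]
  simp only [hrow arr1 hi1, hrow arr2 hi2, hget arr1 hi1, hget arr2 hi2]
  rw [expressMap_ref n (arr1[i.toNat]'hi1) hn0 ha1 ha2,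
      expressMap_ref n (arr2[i.toNat]'hi2) hn0 hb1 hb2]
  rw [row_eq n]
  rw [int_lor_toNat _ _ ha1 hb1]
  have hlt : ((((arr1[i.toNat]'hi1).toNat ||| (arr2[i.toNat]'hi2).toNat : Nat)) : Int).toNat
      < 2 ^ n.toNat := by
    simpa using lor_lt_pow _ _ _ (toNat_lt_pow _ _ ha1 ha2) (toNat_lt_pow _ _ hb1 hb2)
  rw [zfill_ref n _ hn0 (by positivity) hlt]
  simp
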